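-- pv_equiv track=rewrite | github.com/RISC-V-RESILIENCE/FPGA-RISC-V-Firmware-Exemplo | soc.py | pack_text_words
-- ===== SOURCE A (Python) =====
-- def pack_text_words(text, min_words=1):
--     data = text.encode("ascii", errors="ignore") + b"\0"
--     if len(data) % 4:
--         data += b"\0" * (4 - (len(data) % 4))
--     words = [int.from_bytes(data[i:i + 4], byteorder="little") for i in range(0, len(data), 4)]
--     while len(words) < min_words:
--         words.append(0)
--     return words
-- ===== SOURCE B (Python) =====
-- def pack_text_words(text, min_words=1):
--     # One byte-level pass folding each byte into its preallocated word; padding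
--     # is implicit in the zero-filled preallocation.
--     raw = text.encode("ascii", errors="ignore") + b"\0"
--     nwords = (len(raw) + 3) // 4
--     words = [0] * nwords
--     for i, byte in enumerate(raw):
--         words[i // 4] += byte << (8 * (i % 4))
--     words += [0] * (min_words - nwords)
--     return words
-- ===== Notes on version B (the rewrite author's own statement) =====
-- stated objective: alternative
-- what changed: B replaces A's slice-4-byte-chunks-through-int.from_bytes (with an explicit zero-padding step) by a single byte-level pass that folds each byte into its preallocated zero word with words[i // 4] += byte << (8 * (i % 4)); padding is implicit in the preallocation and the trailing while loop becomes one list extension.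
import Mathlib
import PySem

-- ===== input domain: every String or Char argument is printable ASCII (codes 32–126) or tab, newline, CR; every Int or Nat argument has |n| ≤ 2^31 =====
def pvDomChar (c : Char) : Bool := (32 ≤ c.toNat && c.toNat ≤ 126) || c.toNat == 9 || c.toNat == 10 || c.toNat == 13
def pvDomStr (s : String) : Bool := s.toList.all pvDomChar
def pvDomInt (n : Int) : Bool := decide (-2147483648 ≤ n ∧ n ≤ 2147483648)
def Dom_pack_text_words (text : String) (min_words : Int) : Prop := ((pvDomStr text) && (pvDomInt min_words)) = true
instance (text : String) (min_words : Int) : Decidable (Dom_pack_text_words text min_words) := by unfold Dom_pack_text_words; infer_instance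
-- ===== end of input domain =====

-- B folds each byte into a preallocated zero word list in one byte-level pass
-- (padding implicit) instead of slicing padded 4-byte chunks; same cost class, objective: alternative.

-- text.encode("ascii", errors="ignore"): keep exactly the chars with code < 128, as their byte values
def pvBytes (text : String) : List Int :=
  (text.toList.filter (fun c => c.toNat < 128)).map (fun c => (c.toNat : Int))

-- int.from_bytes(bs, byteorder="little")
def pvFromBytesLE (bs : List Int) : Int := bs.foldr (fun b acc => b + 256 * acc) 0

-- A's zero-padding step: if len(data) % 4: data += b"\0" * (4 - len(data) % 4)
def pvPad (data : List Int) : List Int :=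
  if data.length % 4 ≠ 0 then data ++ List.replicate (4 - data.length % 4) 0 else data

-- A's while loop: while len(words) < min_words: words.append(0)
def pvExtend (words : List Int) (min_words : Int) : List Int :=
  if (words.length : Int) < min_words then pvExtend (words ++ [0]) min_words else words
termination_by (min_words - words.length).toNat
decreasing_by simp only [List.length_append, List.length_cons, List.length_nil]; omega

-- ===== PORT A =====
def pack_text_words (text : String) (min_words : Int) : List Int :=
  let data0 : List Int := pvBytes text ++ [0]
  let data : List Int := pvPad data0
  let words := (PySem.List.pyRange 0 (data.length : Int) 4).map
      (fun i => pvFromBytesLE (PySem.List.slice data (some i) (some (i + 4))))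
  pvExtend words min_words

-- ===== PORT B =====
-- 'byte << (8 * (i % 4))' is ported as multiplication by 2 ^ (8 * (i % 4)).toNat:
-- exact, since byte ≥ 0 and the shift amount is a nonnegative int here.
-- 'words[i // 4] += …' is a getD/set pair; the index i // 4 is nonnegative, so .toNat is exact.
def pack_text_words_alt (text : String) (min_words : Int) : List Int :=
  let raw : List Int := pvBytes text ++ [0]
  let nwords : Nat := (raw.length + 3) / 4
  let words := (PySem.List.enumerate raw).foldl
      (fun ws ib =>
        ws.set (PySem.Int.floordiv ib.1 4).toNat
          (ws.getD (PySem.Int.floordiv ib.1 4).toNat 0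
            + ib.2 * 2 ^ (8 * PySem.Int.mod ib.1 4).toNat))
      (List.replicate nwords 0)
  words ++ List.replicate (min_words - (nwords : Int)).toNat 0

-- ===== PRECONDITION & SPEC =====
def Spec_pack_text_words (text : String) (min_words : Int) (out : List Int) : Prop := out = pack_text_words_alt text min_words
instance (text : String) (min_words : Int) (out : List Int) : Decidable (Spec_pack_text_words text min_words out) := by unfold Spec_pack_text_words; infer_instance

-- ===== CLAIM (what is proved, stated in full; the proofs are below) =====
def Claim_equal_pack_text_words : Prop := ∀ (text : String) (min_words : Int), Dom_pack_text_words text min_words → Spec_pack_text_words text min_words (pack_text_words text min_words)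

-- ===== LEMMAS AND PROOFS =====

-- reference: little-endian words of a byte list, last word zero-padded
def pvChunk : List Int → List Int
  | [] => []
  | [b0] => [b0]
  | [b0, b1] => [b0 + 256 * b1]
  | [b0, b1, b2] => [b0 + 256 * b1 + 65536 * b2]
  | b0 :: b1 :: b2 :: b3 :: rest => (b0 + 256 * b1 + 65536 * b2 + 16777216 * b3) :: pvChunk rest

theorem pvChunk_length : ∀ L : List Int, (pvChunk L).length = (L.length + 3) / 4 := by
  intro L
  induction L using pvChunk.induct <;> (simp_all [pvChunk]; try omega)

theorem pvPad_cons4 (b0 b1 b2 b3 : Int) (rest : List Int) :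
    pvPad (b0 :: b1 :: b2 :: b3 :: rest) = b0 :: b1 :: b2 :: b3 :: pvPad rest := by
  unfold pvPad
  have h : (b0 :: b1 :: b2 :: b3 :: rest).length % 4 = rest.length % 4 := by
    simp only [List.length_cons]; omega
  rw [h]
  split_ifs <;> simp [List.cons_append]

theorem pvPad_length (L : List Int) : (pvPad L).length = 4 * ((L.length + 3) / 4) := by
  unfold pvPad
  split_ifs with h <;> (try simp) <;> omega

theorem chunkA : ∀ L : List Int,
    (List.range ((L.length + 3) / 4)).map (fun j => pvFromBytesLE (((pvPad L).drop (4 * j)).take 4))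
      = pvChunk L := by
  intro L
  induction L using pvChunk.induct with
  | case1 => simp [pvChunk]
  | case2 b0 =>
      norm_num [pvPad, pvChunk, pvFromBytesLE, List.replicate]
  | case3 b0 b1 =>
      norm_num [pvPad, pvChunk, pvFromBytesLE, List.replicate]
      try ring
  | case4 b0 b1 b2 =>
      norm_num [pvPad, pvChunk, pvFromBytesLE, List.replicate]
      try ring
  | case5 b0 b1 b2 b3 rest ih =>
      have hn : ((b0 :: b1 :: b2 :: b3 :: rest).length + 3) / 4 = (rest.length + 3) / 4 + 1 := by
        simp only [List.length_cons]; omega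
      rw [hn, List.range_succ_eq_map, List.map_cons, List.map_map,
        show pvChunk (b0 :: b1 :: b2 :: b3 :: rest)
              = (b0 + 256 * b1 + 65536 * b2 + 16777216 * b3) :: pvChunk rest from rfl,
        pvPad_cons4]
      have htail : List.map
            ((fun j => pvFromBytesLE (List.take 4 (List.drop (4 * j) (b0 :: b1 :: b2 :: b3 :: pvPad rest)))) ∘ Nat.succ)
            (List.range ((rest.length + 3) / 4)) = pvChunk rest := by
        rw [← ih]
        apply List.map_congr_left
        intro j _
        simp only [Function.comp_apply, Nat.succ_eq_add_one]
        rw [show 4 * (j + 1) = 4 + 4 * j from by ring, ← List.drop_drop]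
        simp
      rw [htail]
      congr 1
      simp [pvFromBytesLE]
      ring


-- index arithmetic for the byte-fold: i // 4 and 8 * (i % 4) at i = 4*p, 4*p+1, 4*p+2, 4*p+3
theorem pvFd0 (p : Nat) : (PySem.Int.floordiv ((4 * p : Nat) : Int) 4).toNat = p := by
  rw [show (4 : Int) = ((4 : Nat) : Int) from rfl, PySem.Int.floordiv_natCast]; omega

theorem pvFd1 (p : Nat) : (PySem.Int.floordiv (((4 * p : Nat) : Int) + 1) 4).toNat = p := by
  rw [show ((4 * p : Nat) : Int) + 1 = ((4 * p + 1 : Nat) : Int) from by push_cast; ring,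
    show (4 : Int) = ((4 : Nat) : Int) from rfl, PySem.Int.floordiv_natCast]
  omega

theorem pvFd2 (p : Nat) : (PySem.Int.floordiv (((4 * p : Nat) : Int) + 1 + 1) 4).toNat = p := by
  rw [show ((4 * p : Nat) : Int) + 1 + 1 = ((4 * p + 2 : Nat) : Int) from by push_cast; ring,
    show (4 : Int) = ((4 : Nat) : Int) from rfl, PySem.Int.floordiv_natCast]
  omega

theorem pvFd3 (p : Nat) : (PySem.Int.floordiv (((4 * p : Nat) : Int) + 1 + 1 + 1) 4).toNat = p := by
  rw [show ((4 * p : Nat) : Int) + 1 + 1 + 1 = ((4 * p + 3 : Nat) : Int) from by push_cast; ring,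
    show (4 : Int) = ((4 : Nat) : Int) from rfl, PySem.Int.floordiv_natCast]
  omega

theorem pvMd0 (p : Nat) : (8 * PySem.Int.mod ((4 * p : Nat) : Int) 4).toNat = 0 := by
  rw [show (4 : Int) = ((4 : Nat) : Int) from rfl, PySem.Int.mod_natCast]
  have h : (4 * p) % 4 = 0 := by omega
  rw [h]; decide

theorem pvMd1 (p : Nat) : (8 * PySem.Int.mod (((4 * p : Nat) : Int) + 1) 4).toNat = 8 := by
  rw [show ((4 * p : Nat) : Int) + 1 = ((4 * p + 1 : Nat) : Int) from by push_cast; ring,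
    show (4 : Int) = ((4 : Nat) : Int) from rfl, PySem.Int.mod_natCast]
  have h : (4 * p + 1) % 4 = 1 := by omega
  rw [h]; decide

theorem pvMd2 (p : Nat) : (8 * PySem.Int.mod (((4 * p : Nat) : Int) + 1 + 1) 4).toNat = 16 := by
  rw [show ((4 * p : Nat) : Int) + 1 + 1 = ((4 * p + 2 : Nat) : Int) from by push_cast; ring,
    show (4 : Int) = ((4 : Nat) : Int) from rfl, PySem.Int.mod_natCast]
  have h : (4 * p + 2) % 4 = 2 := by omega
  rw [h]; decide

theorem pvMd3 (p : Nat) : (8 * PySem.Int.mod (((4 * p : Nat) : Int) + 1 + 1 + 1) 4).toNat = 24 := by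
  rw [show ((4 * p : Nat) : Int) + 1 + 1 + 1 = ((4 * p + 3 : Nat) : Int) from by push_cast; ring,
    show (4 : Int) = ((4 : Nat) : Int) from rfl, PySem.Int.mod_natCast]
  have h : (4 * p + 3) % 4 = 3 := by omega
  rw [h]; decide

theorem pvSt4 (p : Nat) : ((4 * p : Nat) : Int) + 1 + 1 + 1 + 1 = ((4 * (p + 1) : Nat) : Int) := by
  push_cast; ring

@[simp] theorem pvGetMid (pre : List Int) (x : Int) (t : List Int) :
    (pre ++ x :: t).getD pre.length 0 = x := by
  induction pre with
  | nil => rfl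
  | cons a l ih => simp

@[simp] theorem pvSetMid (pre : List Int) (x : Int) (t : List Int) (v : Int) :
    (pre ++ x :: t).set pre.length v = pre ++ v :: t := by
  induction pre with
  | nil => rfl
  | cons a l ih => simp [ih]

theorem chunkB : ∀ (L : List Int) (pre : List Int),
    (PySem.List.enumerate L ((4 * pre.length : Nat) : Int)).foldl
      (fun ws ib =>
        ws.set (PySem.Int.floordiv ib.1 4).toNat
          (ws.getD (PySem.Int.floordiv ib.1 4).toNat 0
            + ib.2 * 2 ^ (8 * PySem.Int.mod ib.1 4).toNat))
      (pre ++ List.replicate ((L.length + 3) / 4) 0)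
      = pre ++ pvChunk L := by
  intro L
  induction L using pvChunk.induct with
  | case1 =>
      intro pre
      simp [PySem.List.enumerate_nil, pvChunk]
  | case2 b0 =>
      intro pre
      have h1 : (([b0] : List Int).length + 3) / 4 = 1 := by simp
      rw [h1, List.replicate_one]
      simp only [PySem.List.enumerate_cons, PySem.List.enumerate_nil, List.foldl_cons,
        List.foldl_nil, pvFd0, pvMd0, pvGetMid, pvSetMid]
      norm_num [pvChunk]
  | case3 b0 b1 =>
      intro pre
      have h1 : (([b0, b1] : List Int).length + 3) / 4 = 1 := by simp
      rw [h1, List.replicate_one]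
      simp only [PySem.List.enumerate_cons, PySem.List.enumerate_nil, List.foldl_cons,
        List.foldl_nil, pvFd0, pvFd1, pvMd0, pvMd1, pvGetMid, pvSetMid]
      norm_num [pvChunk]
      ring
  | case4 b0 b1 b2 =>
      intro pre
      have h1 : (([b0, b1, b2] : List Int).length + 3) / 4 = 1 := by simp
      rw [h1, List.replicate_one]
      simp only [PySem.List.enumerate_cons, PySem.List.enumerate_nil, List.foldl_cons,
        List.foldl_nil, pvFd0, pvFd1, pvFd2, pvMd0, pvMd1, pvMd2, pvGetMid, pvSetMid]
      norm_num [pvChunk]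
      ring
  | case5 b0 b1 b2 b3 rest ih =>
      intro pre
      have key : ∀ (v : Int),
          (PySem.List.enumerate rest ((4 * (pre.length + 1) : Nat) : Int)).foldl
            (fun ws ib =>
              ws.set (PySem.Int.floordiv ib.1 4).toNat
                (ws.getD (PySem.Int.floordiv ib.1 4).toNat 0
                  + ib.2 * 2 ^ (8 * PySem.Int.mod ib.1 4).toNat))
            (pre ++ v :: List.replicate ((rest.length + 3) / 4) 0)
            = pre ++ v :: pvChunk rest := by
        intro v
        have h := ih (pre ++ [v])
        simpa using h
      have hn : (((b0 :: b1 :: b2 :: b3 :: rest) : List Int).length + 3) / 4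
          = (rest.length + 3) / 4 + 1 := by
        simp only [List.length_cons]; omega
      rw [hn, List.replicate_succ]
      simp only [PySem.List.enumerate_cons, List.foldl_cons, pvFd0, pvFd1, pvFd2, pvFd3,
        pvMd0, pvMd1, pvMd2, pvMd3, pvGetMid, pvSetMid, pvSt4]
      rw [key]
      rw [show pvChunk (b0 :: b1 :: b2 :: b3 :: rest)
            = (b0 + 256 * b1 + 65536 * b2 + 16777216 * b3) :: pvChunk rest from rfl]
      congr 2
      norm_num
      ring

theorem awords_eq (L : List Int) :
    (PySem.List.pyRange 0 (((pvPad L).length : Nat) : Int) 4).map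
      (fun i => pvFromBytesLE (PySem.List.slice (pvPad L) (some i) (some (i + 4))))
      = pvChunk L := by
  rw [PySem.List.pyRange_of_pos 0 _ (by norm_num), List.map_map]
  have hl := pvPad_length L
  have hN : (if (0 : Int) < (((pvPad L).length : Nat) : Int)
      then (((((pvPad L).length : Nat) : Int) - 0 + 4 - 1) / 4).toNat else 0)
      = (L.length + 3) / 4 := by
    split_ifs with h <;> omega
  rw [hN, ← chunkA L]
  apply List.map_congr_left
  intro k hk
  simp only [Function.comp_apply]
  rw [show (0 : Int) + 4 * (k : Nat) = ((4 * k : Nat) : Int) from by push_cast; ring,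
    show ((4 * k : Nat) : Int) + 4 = ((4 * k + 4 : Nat) : Int) from by push_cast; ring,
    PySem.List.slice_natCast,
    show 4 * k + 4 - 4 * k = 4 from by omega]

theorem pvExtend_eq : ∀ (ws : List Int) (m : Int),
    pvExtend ws m = ws ++ List.replicate (m - ws.length).toNat 0 := by
  intro ws m
  induction ws using pvExtend.induct (min_words := m) with
  | case1 ws h ih =>
      rw [pvExtend, if_pos h, ih]
      have hk : (m - (ws.length : Int)).toNat = (m - ((ws ++ [0]).length : Int)).toNat + 1 := by
        simp only [List.length_append, List.length_cons, List.length_nil]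
        push_cast
        omega
      rw [hk, List.replicate_succ]
      simp [List.append_assoc]
  | case2 ws h =>
      rw [pvExtend, if_neg h]
      have hk : (m - (ws.length : Int)).toNat = 0 := by omega
      simp [hk]

-- ===== VERDICT (by name: the statement is the Claim_ definition above) =====
theorem pack_text_words_spec : Claim_equal_pack_text_words := by
  intro text m _
  unfold Spec_pack_text_words
  simp only [pack_text_words, pack_text_words_alt]
  have hB := chunkB (pvBytes text ++ [0]) []
  simp only [List.length_nil, Nat.mul_zero, Nat.cast_zero, List.nil_append] at hB
  rw [awords_eq, pvExtend_eq, hB, pvChunk_length]
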